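-- pv_equiv track=rewrite | github.com/tushgarg20/Alps | opcode_pattern_analysis.py | stride_pattern_extractor
-- ===== SOURCE A (Python) =====
-- def stride_pattern_extractor(line, pos):
--     di = {}
--     if '<' in line:
--         l = line.replace('>','<').split('<')
--         for position in range(1,len(l),2):
--             flag = False
--             vals = l[position].replace(';',',').split(',')
--             for digit in '0123456789':
--                 if digit in vals:
--                     flag = True
--             if flag:
--                 di[(position+1)//2] = l[position].replace(';',',').split(',')
--     test = di.get(pos)
--     if test:
--        pattern = [int(x) for x in test]
--     else:
--         pattern = []
--     num_elements = len(pattern)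
--     return(num_elements, pattern)
-- ===== SOURCE B (Python) =====
-- def stride_pattern_extractor(line, pos):
--     if '<' not in line:
--         return (0, [])
--     parts = line.replace('>', '<').split('<')
--     idx = 2 * pos - 1
--     if pos < 1 or idx >= len(parts):
--         return (0, [])
--     vals = parts[idx].replace(';', ',').split(',')
--     if any(len(v) == 1 and v in '0123456789' for v in vals):
--         pattern = [int(x) for x in vals]
--     else:
--         pattern = []
--     return (len(pattern), pattern)
-- ===== Notes on version B (the rewrite author's own statement) =====
-- stated objective: simpler
-- what changed: B drops A's dict-building scan over every bracket segment and instead directly indexes the one split-segment (index 2*pos-1) that A's key `pos` can come from, qualifying it with the same single-digit-element test.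
import Mathlib
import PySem

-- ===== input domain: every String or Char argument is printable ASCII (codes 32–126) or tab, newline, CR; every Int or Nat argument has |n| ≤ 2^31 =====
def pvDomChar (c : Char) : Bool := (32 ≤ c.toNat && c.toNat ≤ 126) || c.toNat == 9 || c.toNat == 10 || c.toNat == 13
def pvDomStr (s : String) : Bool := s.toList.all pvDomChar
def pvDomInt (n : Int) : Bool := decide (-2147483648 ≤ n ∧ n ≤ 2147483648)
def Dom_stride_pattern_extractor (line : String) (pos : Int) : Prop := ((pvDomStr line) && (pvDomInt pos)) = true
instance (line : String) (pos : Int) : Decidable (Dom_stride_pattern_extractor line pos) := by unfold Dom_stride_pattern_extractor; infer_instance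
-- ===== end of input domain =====

-- B replaces A's dict-building scan over every '<…>'/'<…<' segment by direct
-- indexing of the single segment the key `pos` can come from (objective: simpler).

-- seg.replace(';', ',').split(',')  (shared verbatim by both Pythons)
def pvSegVals (seg : String) : List String :=
  (PySem.Str.split? (PySem.Str.replace seg ";" ",") ",").getD []

-- ===== PORT A =====
-- A's flag loop: for digit in '0123456789': if digit in vals: flag = True
def pvFlagA (vals : List String) : Bool :=
  "0123456789".toList.foldl
    (fun flag digit => if vals.contains (String.ofList [digit]) then true else flag) false

-- A's loop body over one odd position (builds the dict entry if the flag is set)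
def pvStep (l : List String) (di : PySem.Dict Int (List String)) (position : Int) :
    PySem.Dict Int (List String) :=
  let vals := pvSegVals (PySem.List.pyGetD l position "")
  if pvFlagA vals then di.insert (PySem.Int.floordiv (position + 1) 2) vals else di

def stride_pattern_extractor (line : String) (pos : Int) : Int × List Int :=
  let di : PySem.Dict Int (List String) := PySem.Dict.empty
  let di :=
    if PySem.Str.isIn "<" line then
      let l := (PySem.Str.split? (PySem.Str.replace line ">" "<") "<").getD []
      (PySem.List.pyRange 1 (l.length : Int) 2).foldl (pvStep l) di
    else di
  let test := di.get? pos
  let pattern : List Int :=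
    match test with
    | some t => if t ≠ [] then t.map (fun x => (PySem.Int.ofStr? x).getD 0) else []
    | none => []
  ((pattern.length : Int), pattern)

-- ===== PORT B =====
-- B's qualification test: any(len(v) == 1 and v in '0123456789' for v in vals)
def pvFlagB (vals : List String) : Bool :=
  vals.any (fun v => PySem.Str.len v == 1 && PySem.Str.isIn v "0123456789")

def stride_pattern_extractor_alt (line : String) (pos : Int) : Int × List Int :=
  if ¬ PySem.Str.isIn "<" line then (0, [])
  else
    let parts := (PySem.Str.split? (PySem.Str.replace line ">" "<") "<").getD []
    let idx := 2 * pos - 1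
    if pos < 1 ∨ (parts.length : Int) ≤ idx then (0, [])
    else
      let vals := pvSegVals (PySem.List.pyGetD parts idx "")
      let pattern : List Int :=
        if pvFlagB vals then vals.map (fun x => (PySem.Int.ofStr? x).getD 0) else []
      ((pattern.length : Int), pattern)

-- ===== PRECONDITION & SPEC =====
-- Pre_ excludes exactly the inputs on which Python A raises ValueError: the selected
-- segment qualifies (contains a single-digit element) but some element is not int-parsable
-- (e.g. '<5,a>' with pos = 1); Python B raises the same ValueError there.
def Pre_stride_pattern_extractor (line : String) (pos : Int) : Prop :=
  PySem.Str.isIn "<" line = true → 1 ≤ pos →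
    ∀ seg ∈ (PySem.List.pyGet?
        ((PySem.Str.split? (PySem.Str.replace line ">" "<") "<").getD []) (2 * pos - 1)).toList,
      pvFlagB (pvSegVals seg) = true →
        ∀ v ∈ pvSegVals seg, (PySem.Int.ofStr? v).isSome = true

instance (line : String) (pos : Int) : Decidable (Pre_stride_pattern_extractor line pos) := by
  unfold Pre_stride_pattern_extractor; infer_instance

def pvWitness_stride_pattern_extractor : String × Int := ("a<3,4;5>b<x>", 1)

def Spec_stride_pattern_extractor (line : String) (pos : Int) (out : Int × List Int) : Prop :=
  out = stride_pattern_extractor_alt line pos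
instance (line : String) (pos : Int) (out : Int × List Int) :
    Decidable (Spec_stride_pattern_extractor line pos out) := by
  unfold Spec_stride_pattern_extractor; infer_instance

-- ===== CLAIM (what is proved, stated in full; the proofs are below) =====
def Claim_equal_stride_pattern_extractor : Prop :=
  ∀ (line : String) (pos : Int), Dom_stride_pattern_extractor line pos →
    Pre_stride_pattern_extractor line pos →
      Spec_stride_pattern_extractor line pos (stride_pattern_extractor line pos)

-- ===== LEMMAS AND PROOFS =====

-- A's flag loop is an `any` over the ten digit characters
lemma pvFlagA_foldl_any (vals : List String) (ds : List Char) (b : Bool) :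
    ds.foldl (fun flag digit => if vals.contains (String.ofList [digit]) then true else flag) b
      = (b || ds.any (fun d => vals.contains (String.ofList [d]))) := by
  induction ds generalizing b with
  | nil => simp
  | cons d ds ih =>
    simp only [List.foldl_cons, List.any_cons, ih]
    cases b <;> simp

-- A's flag and B's flag agree
lemma flag_eq (vals : List String) : pvFlagA vals = pvFlagB vals := by
  unfold pvFlagA pvFlagB
  rw [pvFlagA_foldl_any, Bool.false_or, Bool.eq_iff_iff]
  simp only [List.any_eq_true, List.contains_iff_mem, Bool.and_eq_true, beq_iff_eq,
    PySem.Str.len_eq, PySem.Str.isIn_iff_infix]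
  constructor
  · rintro ⟨d, hd, hmem⟩
    refine ⟨String.ofList [d], hmem, ?_, ?_⟩
    · simp [String.toList_ofList]
    · rw [String.toList_ofList, List.singleton_infix_iff]; exact hd
  · rintro ⟨v, hv, hlen, hinf⟩
    have : v.toList.length = 1 := by exact_mod_cast hlen
    obtain ⟨c, hc⟩ := List.length_eq_one_iff.mp this
    refine ⟨c, ?_, ?_⟩
    · rw [hc, List.singleton_infix_iff] at hinf; exact hinf
    · have : v = String.ofList [c] := by
        rw [← hc, String.ofList_toList]
      rwa [← this]

-- a qualifying segment is nonempty
lemma flagB_ne_nil {vals : List String} (h : pvFlagB vals = true) : vals ≠ [] := by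
  intro hnil; rw [hnil] at h; simp [pvFlagB] at h

-- the dict lookup after folding A's loop over the first m odd positions
lemma get?_fold (l : List String) (pos : Int) (m : Nat) :
    (((List.range m).map (fun k : Nat => (1 : Int) + 2 * (k : Int))).foldl (pvStep l) PySem.Dict.empty).get? pos
      = if 1 ≤ pos ∧ pos ≤ (m : Int) ∧
            pvFlagA (pvSegVals (PySem.List.pyGetD l (2 * pos - 1) "")) = true
        then some (pvSegVals (PySem.List.pyGetD l (2 * pos - 1) "")) else none := by
  induction m with
  | zero =>
    rw [if_neg (by push_cast; omega)]
    simp [PySem.Dict.get?_empty]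
  | succ m ih =>
    rw [List.range_succ, List.map_append, List.foldl_append]
    simp only [List.map_cons, List.map_nil, List.foldl_cons, List.foldl_nil]
    have hkey : PySem.Int.floordiv ((1 + 2 * (m : Int)) + 1) 2 = (m : Int) + 1 := by
      rw [PySem.Int.floordiv_eq_ediv_of_pos (by norm_num)]; omega
    have hidx : (2 : Int) * ((m : Int) + 1) - 1 = 1 + 2 * (m : Int) := by ring
    set vals1 := pvSegVals (PySem.List.pyGetD l (1 + 2 * (m : Int)) "") with hv1
    have hstep : ∀ di : PySem.Dict Int (List String),
        (pvStep l di (1 + 2 * (m : Int))).get? pos =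
          if pvFlagA vals1 = true then
            (if pos = (m : Int) + 1 then some vals1 else di.get? pos)
          else di.get? pos := by
      intro di
      simp only [pvStep, ← hv1]
      by_cases hf : pvFlagA vals1 = true
      · rw [if_pos hf, if_pos hf, hkey, PySem.Dict.get?_insert]
      · rw [if_neg hf, if_neg hf]
    rw [hstep, ih]
    by_cases hf : pvFlagA vals1 = true
    · rw [if_pos hf]
      by_cases hp : pos = (m : Int) + 1
      · subst hp
        rw [if_pos rfl, if_pos]
        · rw [hidx, ← hv1]
        · refine ⟨by omega, by push_cast; omega, ?_⟩
          rw [hidx, ← hv1]; exact hf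
      · rw [if_neg hp]
        refine if_congr ?_ rfl rfl
        constructor
        · rintro ⟨a, b, c⟩; exact ⟨a, by push_cast; omega, c⟩
        · rintro ⟨a, b, c⟩; exact ⟨a, by push_cast at b ⊢; omega, c⟩
    · rw [if_neg hf]
      refine if_congr ?_ rfl rfl
      constructor
      · rintro ⟨a, b, c⟩; exact ⟨a, by push_cast; omega, c⟩
      · rintro ⟨a, b, c⟩
        refine ⟨a, ?_, c⟩
        by_cases hp : pos = (m : Int) + 1
        · exfalso; rw [hp, hidx, ← hv1] at c; exact hf c
        · push_cast at b ⊢; omega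

-- range(1, n, 2) written as the first M odd positions
lemma pyRange_odd (n : Int) :
    PySem.List.pyRange 1 n 2
      = (List.range (if 1 < n then ((n - 1 + 2 - 1) / 2).toNat else 0)).map
          (fun k : Nat => (1 : Int) + 2 * (k : Int)) := by
  exact PySem.List.pyRange_of_pos 1 n (by norm_num)

-- ===== VERDICT (by name: the statement is the Claim_ definition above) =====
theorem stride_pattern_extractor_spec : Claim_equal_stride_pattern_extractor := by
  intro line pos _ _
  unfold Spec_stride_pattern_extractor stride_pattern_extractor stride_pattern_extractor_alt
  by_cases hin : PySem.Str.isIn "<" line = true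
  · simp only [hin, if_true, not_true, if_false]
    set l := (PySem.Str.split? (PySem.Str.replace line ">" "<") "<").getD [] with hl
    rw [pyRange_odd, get?_fold]
    set M : Nat := if 1 < (l.length : Int) then (((l.length : Int) - 1 + 2 - 1) / 2).toNat else 0
      with hM
    have hMcast : 1 ≤ pos ∧ pos ≤ (M : Int) ↔ 1 ≤ pos ∧ 2 * pos - 1 < (l.length : Int) := by
      rw [hM]
      by_cases h1 : 1 < (l.length : Int)
      · rw [if_pos h1]
        constructor
        · rintro ⟨ha, hb⟩
          refine ⟨ha, ?_⟩
          have : ((((l.length : Int) - 1 + 2 - 1) / 2).toNat : Int)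
              = ((l.length : Int) - 1 + 2 - 1) / 2 := by omega
          omega
        · rintro ⟨ha, hb⟩
          refine ⟨ha, ?_⟩
          have : ((((l.length : Int) - 1 + 2 - 1) / 2).toNat : Int)
              = ((l.length : Int) - 1 + 2 - 1) / 2 := by omega
          omega
      · rw [if_neg h1]; push_cast; omega
    by_cases hcond : 1 ≤ pos ∧ pos ≤ (M : Int) ∧
        pvFlagA (pvSegVals (PySem.List.pyGetD l (2 * pos - 1) "")) = true
    · rw [if_pos hcond]
      obtain ⟨h1, h2, hflag⟩ := hcond
      have hflagB : pvFlagB (pvSegVals (PySem.List.pyGetD l (2 * pos - 1) "")) = true := by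
        rw [← flag_eq]; exact hflag
      have hb : ¬ (pos < 1 ∨ (l.length : Int) ≤ 2 * pos - 1) := by
        have := hMcast.mp ⟨h1, h2⟩; omega
      rw [if_neg hb]
      simp only [hflagB, if_true, if_pos (flagB_ne_nil hflagB)]
    · rw [if_neg hcond]
      by_cases hb : pos < 1 ∨ (l.length : Int) ≤ 2 * pos - 1
      · rw [if_pos hb]
        simp
      · rw [if_neg hb]
        have hflag : pvFlagA (pvSegVals (PySem.List.pyGetD l (2 * pos - 1) "")) = false := by
          rcases Bool.eq_false_or_eq_true
              (pvFlagA (pvSegVals (PySem.List.pyGetD l (2 * pos - 1) ""))) with h | h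
          · exact absurd ⟨by omega, (hMcast.mpr ⟨by omega, by omega⟩).2, h⟩ hcond
          · exact h
        rw [← flag_eq]
        simp [hflag]
  · simp only [if_neg hin, if_pos hin]
    simp [PySem.Dict.get?_empty]
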